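-- pv_equiv track=rewrite | github.com/prashant97sikarwar/leetcode | Dynamic Programming/total_insertion_and-del_to_convert_str1_to_str2.py | answer
-- ===== SOURCE A (Python) =====
-- def answer(n,m,str1,str2):
--     dp = [[0 for i in range(m+1)] for i in range(n+1)]
--     for i in range(n+1):
--         for j in range(m+1):
--             if i == 0 or j == 0:
--                 dp[i][j] = 0
--             elif str1[i-1] == str2[j-1]:
--                 dp[i][j] = 1 + dp[i-1][j-1]
--             else:
--                 dp[i][j] = max(dp[i-1][j], dp[i][j-1])
--     x = dp[n][m]
--     return (n - x + m - x)
-- ===== SOURCE B (Python) =====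
-- def answer(n, m, str1, str2):
--     # Direct insert/delete edit distance with a rolling row built as a scan
--     # over the zipped previous row; no LCS table, no n+m-2*lcs arithmetic.
--     if n == 0 or m == 0:
--         return n + m
--     row = list(range(m + 1))
--     for i, c in enumerate(str1[:n], 1):
--         acc = [i]
--         for d2, (cj, d1) in zip(row[1:], zip(str2[:m], row)):
--             acc.append(d1 if cj == c else 1 + min(d2, acc[-1]))
--         row = acc
--     return row[m]
-- ===== Notes on version B (the rewrite author's own statement) =====
-- stated objective: alternative
-- what changed: B computes the insert/delete edit distance directly: a rolling single row produced as a scan over the zipped previous row (zip of row[1:], str2 and row), returning dp[n][m] with no LCS table and no n+m-2*lcs post-arithmetic.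
import Mathlib
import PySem

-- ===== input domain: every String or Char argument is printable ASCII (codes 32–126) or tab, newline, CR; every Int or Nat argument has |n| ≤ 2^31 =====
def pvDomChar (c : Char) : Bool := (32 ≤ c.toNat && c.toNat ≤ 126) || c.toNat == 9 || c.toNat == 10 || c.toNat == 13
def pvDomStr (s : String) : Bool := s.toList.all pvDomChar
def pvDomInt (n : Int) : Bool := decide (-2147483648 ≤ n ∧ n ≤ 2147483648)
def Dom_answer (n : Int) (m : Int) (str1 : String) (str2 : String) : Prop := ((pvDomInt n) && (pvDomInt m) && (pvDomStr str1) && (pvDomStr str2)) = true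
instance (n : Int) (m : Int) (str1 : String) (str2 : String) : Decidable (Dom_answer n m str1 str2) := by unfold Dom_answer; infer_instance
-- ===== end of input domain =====

-- B computes the insert/delete edit distance directly (rolling row built as a scan over the
-- zipped previous row) instead of A's full LCS table plus the n+m-2*lcs arithmetic; same O(n*m) time.


-- ===== PORT A =====
-- A's row i (i ≥ 1) of the LCS table, built cell by cell left to right
-- (cell 0 is the j == 0 base case 0; cell j+1 uses prev = row i-1 and the cells built so far).
def rowA (c : Char) (s2 : List Char) (prev : List Int) : Nat → List Int
  | 0 => [0]
  | j+1 =>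
      let r := rowA c s2 prev j
      r ++ [if c = s2.getD j ' ' then 1 + prev.getD j 0
            else max (prev.getD (j+1) 0) (r.getD j 0)]

-- A's LCS table, row by row; row 0 is the i == 0 base case (all zeros).
def tableA (s1 s2 : List Char) (m : Nat) : Nat → List Int
  | 0 => List.replicate (m+1) (0 : Int)
  | i+1 => rowA (s1.getD i ' ') s2 (tableA s1 s2 m i) m

def answer (n : Int) (m : Int) (str1 : String) (str2 : String) : Int :=
  let x := (tableA str1.toList str2.toList m.toNat n.toNat).getD m.toNat 0
  n - x + m - x

-- ===== PORT B =====
-- Source B's inner loop: acc starts at [i] and appends one cell per element of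
-- zip(row[1:], zip(str2[:m], row)); 'append + acc[-1]' is rendered as cons + headD
-- with one final reverse (the standard exact rendering of a Python append loop).
def rowB (c : Char) (i : Int) (s2 : List Char) (prev : List Int) : List Int :=
  ((prev.tail.zip (s2.zip prev)).foldl
    (fun acc x => (if x.2.1 = c then x.2.2 else 1 + min x.1 (acc.headD 0)) :: acc)
    [i]).reverse

def answer_alt (n : Int) (m : Int) (str1 : String) (str2 : String) : Int :=
  if n = 0 ∨ m = 0 then n + m
  else
    ((PySem.List.slice str1.toList none (some n)).foldl
      (fun st c => (rowB c (st.2 + 1) (PySem.List.slice str2.toList none (some m)) st.1, st.2 + 1))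
      ((List.range (m.toNat + 1)).map Int.ofNat, (0 : Int))).1.getD m.toNat 0

-- ===== PRECONDITION & SPEC =====
-- Exactly the inputs where the Python A returns: it raises IndexError when n or m is negative,
-- and when some str1[i-1]/str2[j-1] access is out of range (which happens iff n ≥ 1 ∧ m ≥ 1 and
-- n or m exceeds its string's length).
def Pre_answer (n : Int) (m : Int) (str1 : String) (str2 : String) : Prop :=
  0 ≤ n ∧ 0 ≤ m ∧ (n = 0 ∨ m = 0 ∨ (n ≤ str1.toList.length ∧ m ≤ str2.toList.length))
instance (n : Int) (m : Int) (str1 : String) (str2 : String) : Decidable (Pre_answer n m str1 str2) := by unfold Pre_answer; infer_instance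

def pvWitness_answer : Int × Int × String × String := (3, 3, "abc", "acd")

def Spec_answer (n : Int) (m : Int) (str1 : String) (str2 : String) (out : Int) : Prop := out = answer_alt n m str1 str2
instance (n : Int) (m : Int) (str1 : String) (str2 : String) (out : Int) : Decidable (Spec_answer n m str1 str2 out) := by unfold Spec_answer; infer_instance

-- ===== CLAIM (what is proved, stated in full; the proofs are below) =====
def Claim_equal_answer : Prop := ∀ (n : Int) (m : Int) (str1 : String) (str2 : String), Dom_answer n m str1 str2 → Pre_answer n m str1 str2 → Spec_answer n m str1 str2 (answer n m str1 str2)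

-- ===== LEMMAS AND PROOFS =====

-- Pointwise recurrence of A's LCS table.
def Lrec (s1 s2 : List Char) : Nat → Nat → Int
  | 0, _ => 0
  | _+1, 0 => 0
  | i+1, j+1 =>
      if s1.getD i ' ' = s2.getD j ' ' then 1 + Lrec s1 s2 i j
      else max (Lrec s1 s2 i (j+1)) (Lrec s1 s2 (i+1) j)

-- Pointwise recurrence of B's edit-distance table.
def Erec (s1 s2 : List Char) : Nat → Nat → Int
  | 0, j => (j : Int)
  | i+1, 0 => (i : Int) + 1
  | i+1, j+1 =>
      if s1.getD i ' ' = s2.getD j ' ' then Erec s1 s2 i j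
      else 1 + min (Erec s1 s2 i (j+1)) (Erec s1 s2 (i+1) j)

theorem rowA_length (c : Char) (s2 : List Char) (prev : List Int) (j : Nat) :
    (rowA c s2 prev j).length = j + 1 := by
  induction j with
  | zero => simp [rowA]
  | succ j ih => simp [rowA, ih]

theorem rowA_getD (s1 s2 : List Char) (i : Nat) (prev : List Int) (m : Nat)
    (hprev : ∀ j, j ≤ m → prev.getD j 0 = Lrec s1 s2 i j) :
    ∀ j, j ≤ m → ∀ k, k ≤ j →
      (rowA (s1.getD i ' ') s2 prev j).getD k 0 = Lrec s1 s2 (i+1) k := by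
  intro j
  induction j with
  | zero =>
      intro _ k hk
      interval_cases k
      simp [rowA, Lrec]
  | succ j ih =>
      intro hjm k hk
      rcases Nat.lt_or_ge k (j+1) with hlt | hge
      · have hk' : k ≤ j := Nat.lt_succ_iff.mp hlt
        rw [rowA]
        rw [List.getD_append _ _ _ _ (by rw [rowA_length]; omega)]
        exact ih (by omega) k hk'
      · have hk1 : k = j + 1 := by omega
        subst hk1
        rw [rowA]
        rw [List.getD_append_right _ _ _ _ (by rw [rowA_length])]
        simp only [rowA_length, Nat.sub_self, List.getD_cons_zero]
        rw [hprev j (by omega), hprev (j+1) hjm, ih (by omega) j (le_refl j)]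
        rw [Lrec]

theorem tableA_getD (s1 s2 : List Char) (m : Nat) :
    ∀ i, ∀ j, j ≤ m → (tableA s1 s2 m i).getD j 0 = Lrec s1 s2 i j := by
  intro i
  induction i with
  | zero =>
      intro j hj
      have h : j < m + 1 := by omega
      rw [tableA, List.getD_eq_getElem?_getD, List.getElem?_replicate, if_pos h]
      cases j <;> simp [Lrec]
  | succ i ih =>
      intro j hj
      rw [tableA]
      exact rowA_getD s1 s2 i _ m ih m (le_refl m) j hj

theorem E_eq_L (s1 s2 : List Char) :
    ∀ i j, Erec s1 s2 i j = (i : Int) + j - 2 * Lrec s1 s2 i j := by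
  intro i
  induction i with
  | zero => intro j; simp [Erec, Lrec]
  | succ i ih =>
      intro j
      induction j with
      | zero => simp [Erec, Lrec]
      | succ j ihj =>
          rw [Erec, Lrec]
          split
          · rw [ih j]; push_cast; ring
          · rw [ih (j+1), ihj]; push_cast; omega

-- A plain recursive scan (kept out of the ports; used only to reason about rowB's fold).
def scanE {α : Type} (f : Int → α → Int) (a : Int) : List α → List Int
  | [] => [a]
  | x :: xs => a :: scanE f (f a x) xs

theorem length_scanE {α : Type} (f : Int → α → Int) :
    ∀ (z : List α) (a : Int), (scanE f a z).length = z.length + 1 := by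
  intro z
  induction z with
  | nil => intro a; simp [scanE]
  | cons x xs ih => intro a; simp [scanE, ih]

-- The cons-and-reverse append loop is a scan.
theorem foldl_cons_rev {α : Type} (f : Int → α → Int) :
    ∀ (z : List α) (acc : List Int) (a : Int),
      (z.foldl (fun acc x => f (acc.headD 0) x :: acc) (a :: acc)).reverse
        = acc.reverse ++ scanE f a z := by
  intro z
  induction z with
  | nil => intro acc a; simp [scanE]
  | cons x xs ih =>
      intro acc a
      simp only [List.foldl_cons, List.headD_cons, scanE]
      rw [ih (a :: acc) (f a x)]
      simp

theorem rowB_eq_scanE (c : Char) (i : Int) (s2 : List Char) (prev : List Int) :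
    rowB c i s2 prev
      = scanE (fun last x => if x.2.1 = c then x.2.2 else 1 + min x.1 last) i
          (prev.tail.zip (s2.zip prev)) := by
  unfold rowB
  have := foldl_cons_rev (fun last (x : Int × Char × Int) => if x.2.1 = c then x.2.2 else 1 + min x.1 last)
    (prev.tail.zip (s2.zip prev)) [] i
  simpa using this

-- scanl spec along the zipped previous row, generalized over the starting column j.
theorem scan_spec (s1 s2 : List Char) (i m : Nat) (p : List Int)
    (hm2 : m ≤ s2.length)
    (hlen : p.length = m + 1)
    (hp : ∀ t, t ≤ m → p.getD t 0 = Erec s1 s2 i t) :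
    ∀ (k j : Nat), j + k ≤ m →
      (scanE
          (fun last x => if x.2.1 = s1.getD i ' ' then x.2.2 else 1 + min x.1 last)
          (Erec s1 s2 (i+1) j)
          ((p.drop (j+1)).zip (((s2.take m).drop j).zip (p.drop j)))).getD k 0
        = Erec s1 s2 (i+1) (j+k) := by
  intro k
  induction k with
  | zero =>
      intro j _
      cases (p.drop (j+1)).zip (((s2.take m).drop j).zip (p.drop j)) <;> simp [scanE]
  | succ k ih =>
      intro j hjk
      have hj : j < m := by omega
      have hj1 : j + 1 < p.length := by omega
      have hj2 : j + 2 ≤ p.length := by omega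
      have hs : j < (s2.take m).length := by simp [List.length_take]; omega
      rw [List.drop_eq_getElem_cons hj1, List.drop_eq_getElem_cons (by omega : j < p.length),
          List.drop_eq_getElem_cons hs]
      simp only [List.zip_cons_cons, scanE]
      rw [List.getD_cons_succ, show j + (k+1) = (j+1)+k by omega]
      convert ih (j+1) (by omega) using 3
      have e1 : p[j] = Erec s1 s2 i j := by
        have := hp j (by omega)
        rwa [List.getD_eq_getElem _ _ (by omega)] at this
      have e2 : p[j+1] = Erec s1 s2 i (j+1) := by
        have := hp (j+1) (by omega)
        rwa [List.getD_eq_getElem _ _ hj1] at this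
      have e3 : (List.take m s2)[j] = s2.getD j ' ' := by
        rw [List.getElem_take, List.getD_eq_getElem _ _ (by omega)]
      rw [e3, Erec]
      by_cases h : s1.getD i ' ' = s2.getD j ' '
      · simp only [List.getD] at h ⊢
        simp only [e1]
        simp [h]
      · simp only [List.getD] at h ⊢
        rw [if_neg (fun hh => h hh.symm), if_neg h]
        exact congrArg (fun z => 1 + min z (Erec s1 s2 (i + 1) j)) e2

-- Row invariant for one B step.
theorem rowB_spec (s1 s2 : List Char) (i m : Nat) (p : List Int)
    (hm2 : m ≤ s2.length) (hlen : p.length = m + 1)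
    (hp : ∀ t, t ≤ m → p.getD t 0 = Erec s1 s2 i t) :
    (rowB (s1.getD i ' ') ((i : Int) + 1) (s2.take m) p).length = m + 1 ∧
    ∀ t, t ≤ m → (rowB (s1.getD i ' ') ((i : Int) + 1) (s2.take m) p).getD t 0
        = Erec s1 s2 (i+1) t := by
  have hz : (p.tail.zip ((s2.take m).zip p)).length = m := by
    simp [List.length_zip, List.length_take, List.length_tail, hlen]; omega
  constructor
  · rw [rowB_eq_scanE, length_scanE, hz]
  · intro t ht
    rw [rowB_eq_scanE]
    have hb : ((i : Int) + 1) = Erec s1 s2 (i+1) 0 := by simp [Erec]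
    have h0 : p.tail = p.drop 1 := by rw [List.drop_one]
    have h1 : (s2.take m) = (s2.take m).drop 0 := by simp
    have h2 : p = p.drop 0 := by simp
    rw [hb, h0]
    conv_lhs => rw [h1, h2]
    have := scan_spec s1 s2 i m p hm2 hlen hp t 0 (by omega)
    simpa using this

-- The outer foldl over the (taken) characters of str1, as a recursion.
def rowsList (s2t : List Char) : List Int → Int → List Char → List Int
  | p, _, [] => p
  | p, i, c :: cs => rowsList s2t (rowB c (i+1) s2t p) (i+1) cs

theorem foldl_rowsList (s2t : List Char) :
    ∀ (l : List Char) (p : List Int) (i : Int),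
      l.foldl (fun st c => (rowB c (st.2 + 1) s2t st.1, st.2 + 1)) (p, i)
        = (rowsList s2t p i l, i + l.length) := by
  intro l
  induction l with
  | nil => intro p i; simp [rowsList]
  | cons c cs ih =>
      intro p i
      simp only [List.foldl_cons, rowsList]
      rw [ih]
      simp only [List.length_cons]
      congr 1
      push_cast
      ring

theorem rowsList_spec (s1 s2 : List Char) (n m : Nat)
    (hn : n ≤ s1.length) (hm : m ≤ s2.length) :
    ∀ (l : List Char) (i : Nat) (p : List Int),
      l = (s1.take n).drop i →
      p.length = m + 1 →
      (∀ t, t ≤ m → p.getD t 0 = Erec s1 s2 i t) →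
      ∀ t, t ≤ m →
        (rowsList (s2.take m) p (i : Int) l).getD t 0 = Erec s1 s2 (i + l.length) t := by
  intro l
  induction l with
  | nil => intro i p _ _ hp t ht; simpa [rowsList] using hp t ht
  | cons c cs ih =>
      intro i p hl hlen hp t ht
      have hi : i < (s1.take n).length := by
        by_contra h
        rw [List.drop_eq_nil_of_le (by omega)] at hl
        simp at hl
      rw [List.length_take] at hi
      have hi' : i < n := by omega
      have hi2 : i < s1.length := by omega
      have hc : c = s1.getD i ' ' := by
        have h1 := congrArg (fun xs => xs[0]?) hl
        simp only [List.getElem?_cons_zero, List.getElem?_drop, Nat.add_zero] at h1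
        rw [List.getElem?_take_of_lt hi'] at h1
        simp [List.getD, ← h1]
      have hcs : cs = (s1.take n).drop (i+1) := by
        have := congrArg List.tail hl
        simpa [List.tail_drop] using this
      obtain ⟨hlen', hrow⟩ := rowB_spec s1 s2 i m p hm hlen hp
      have hrec := ih (i+1) (rowB c ((i:Int)+1) (s2.take m) p) hcs (hc ▸ hlen')
        (fun t ht => hc ▸ hrow t ht) t ht
      simp only [rowsList, List.length_cons]
      rw [show (i:Int) + 1 = ((i+1 : Nat) : Int) from by push_cast; ring,
          show i + (cs.length + 1) = (i + 1) + cs.length from by omega]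
      exact hrec

-- ===== VERDICT (by name: the statement is the Claim_ definition above) =====
theorem answer_spec : Claim_equal_answer := by
  intro n m str1 str2 _ hpre
  obtain ⟨hn, hm, hcase⟩ := hpre
  unfold Spec_answer answer answer_alt
  rw [tableA_getD _ _ _ _ _ (le_refl _)]
  by_cases h0 : n = 0 ∨ m = 0
  · rw [if_pos h0]
    have hx : Lrec str1.toList str2.toList n.toNat m.toNat = 0 := by
      rcases h0 with h | h
      · subst h; simp [Lrec]
      · subst h
        cases hnn : n.toNat with
        | zero => simp [Lrec]
        | succ k => simp [Lrec]
    rw [hx]; ring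
  · rw [if_neg h0]
    rcases not_or.mp h0 with ⟨hn1, hm1⟩
    have hb : n ≤ str1.toList.length ∧ m ≤ str2.toList.length := by tauto
    have hnN : n.toNat ≤ str1.toList.length := by omega
    have hmN : m.toNat ≤ str2.toList.length := by omega
    have es1 : PySem.List.slice str1.toList none (some n) = str1.toList.take n.toNat := by
      rw [← Int.toNat_of_nonneg hn, PySem.List.slice_to_natCast]
      congr 1
    have es2 : PySem.List.slice str2.toList none (some m) = str2.toList.take m.toNat := by
      rw [← Int.toNat_of_nonneg hm, PySem.List.slice_to_natCast]
      congr 1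
    rw [es1, es2, foldl_rowsList]
    simp only
    have hlen0 : ((List.range (m.toNat + 1)).map Int.ofNat).length = m.toNat + 1 := by simp
    have hp0 : ∀ t, t ≤ m.toNat →
        ((List.range (m.toNat + 1)).map Int.ofNat).getD t 0 = Erec str1.toList str2.toList 0 t := by
      intro t ht
      rw [List.getD_eq_getElem _ _ (by simpa using by omega)]
      simp [Erec]
    have hmain := rowsList_spec str1.toList str2.toList n.toNat m.toNat hnN hmN
      ((str1.toList.take n.toNat).drop 0) 0 _ (by simp) hlen0 hp0 m.toNat (le_refl _)
    simp only [List.drop_zero, Nat.cast_zero, List.length_take] at hmain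
    rw [show (0:Nat) + min n.toNat str1.toList.length = n.toNat from by omega] at hmain
    rw [hmain, E_eq_L]
    rw [Int.toNat_of_nonneg hn, Int.toNat_of_nonneg hm]
    ring
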